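-- pv_equiv track=rewrite | github.com/matslindh/codingchallenges | adventofcode2023/day12.py | get_possible_placements
-- ===== SOURCE A (Python) =====
-- def get_possible_placements(pattern):
--     possible_placements_per_position = [0] * len(pattern)
--     required_placements_per_position = [0] * len(pattern)
--
--     idx = len(pattern)
--     possible_count = 0
--     required_count = 0
--
--     while True:
--         idx -= 1
--
--         if idx < 0:
--             break
--
--         if pattern[idx] == '?':
--             possible_count += 1
--             required_count = 0
--         elif pattern[idx] == '#':
--             possible_count += 1
--             required_count += 1
--         else:
--             required_count = 0
--             possible_count = 0
--
--         required_placements_per_position[idx] = required_count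
--         possible_placements_per_position[idx] = possible_count
--
--     return possible_placements_per_position, required_placements_per_position
-- ===== SOURCE B (Python) =====
-- def _fill(pattern, pred):
--     n = len(pattern)
--     out = [0] * n
--     i = 0
--     while i < n:
--         if pred(pattern[i]):
--             j = i
--             while j < n and pred(pattern[j]):
--                 j += 1
--             for k in range(i, j):
--                 out[k] = j - k
--             i = j
--         else:
--             i += 1
--     return out
--
--
-- def get_possible_placements(pattern):
--     return (_fill(pattern, lambda c: c == '?' or c == '#'),
--             _fill(pattern, lambda c: c == '#'))
-- ===== Notes on version B (the rewrite author's own statement) =====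
-- stated objective: alternative
-- what changed: Replaces the single backward counter pass with a forward scan that splits the pattern into maximal runs ('?'/'#' runs for possible, '#' runs for required) and fills each run with descending values L..1 arithmetically.
import Mathlib
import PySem

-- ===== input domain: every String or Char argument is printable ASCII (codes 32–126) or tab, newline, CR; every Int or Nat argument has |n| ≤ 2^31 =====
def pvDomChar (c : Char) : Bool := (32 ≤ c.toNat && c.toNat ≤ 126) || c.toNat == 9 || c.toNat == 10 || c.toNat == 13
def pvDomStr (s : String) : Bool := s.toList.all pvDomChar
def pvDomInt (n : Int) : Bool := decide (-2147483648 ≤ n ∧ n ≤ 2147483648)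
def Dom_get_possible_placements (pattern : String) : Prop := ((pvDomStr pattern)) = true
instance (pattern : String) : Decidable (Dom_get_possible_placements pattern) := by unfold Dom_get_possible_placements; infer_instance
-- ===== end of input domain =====

-- B replaces A's backward counter pass by a forward maximal-run segment scan filled
-- arithmetically; same cost, different decomposition (objective: alternative).

-- ===== PORT A =====
-- A's while loop runs idx from len-1 down to 0, updating (possible_count, required_count)
-- and writing them at position idx; ported as the obvious recursion that processes the
-- tail (higher indices) first, carrying the same counts and building the arrays by
-- prepending at idx.
def pvALoop : List Char → Int × Int × List Int × List Int
  | [] => (0, 0, [], [])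
  | c :: rest =>
    let st := pvALoop rest
    let pc := st.1
    let rc := st.2.1
    let ps := st.2.2.1
    let rs := st.2.2.2
    if c = '?' then (pc + 1, 0, (pc + 1) :: ps, 0 :: rs)
    else if c = '#' then (pc + 1, rc + 1, (pc + 1) :: ps, (rc + 1) :: rs)
    else (0, 0, 0 :: ps, 0 :: rs)

def get_possible_placements (pattern : String) : List Int × List Int :=
  let st := pvALoop pattern.toList
  (st.2.2.1, st.2.2.2)

-- ===== PORT B =====
-- Source B's _fill: forward scan; a maximal run of pred-chars of length k gets the values
-- k, k-1, …, 1 (out[pos] = run_end - pos), all other positions stay 0.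
def pvSegFill (p : Char → Bool) : List Char → List Int
  | [] => []
  | c :: rest =>
    if p c then
      let k := ((c :: rest).takeWhile p).length
      (List.range k).map (fun i : Nat => (k : Int) - (i : Int)) ++ pvSegFill p ((c :: rest).drop k)
    else 0 :: pvSegFill p rest
termination_by l => l.length
decreasing_by
  · simp only [List.length_drop]
    have hk : 0 < ((c :: rest).takeWhile p).length := by
      simp [*]
    simp only [List.length_cons]
    omega
  · simp

def get_possible_placements_alt (pattern : String) : List Int × List Int :=
  (pvSegFill (fun c => c = '?' || c = '#') pattern.toList,
   pvSegFill (fun c => c = '#') pattern.toList)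

-- ===== PRECONDITION & SPEC =====
def Spec_get_possible_placements (pattern : String) (out : List Int × List Int) : Prop := out = get_possible_placements_alt pattern
instance (pattern : String) (out : List Int × List Int) : Decidable (Spec_get_possible_placements pattern out) := by unfold Spec_get_possible_placements; infer_instance

-- ===== CLAIM (what is proved, stated in full; the proofs are below) =====
def Claim_equal_get_possible_placements : Prop := ∀ (pattern : String), Dom_get_possible_placements pattern → Spec_get_possible_placements pattern (get_possible_placements pattern)

-- ===== LEMMAS AND PROOFS =====

-- Suffix run-length characterization: value at a position is 1 + value after it if the
-- predicate holds, else 0.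
def pvGRun (p : Char → Bool) : List Char → List Int
  | [] => []
  | c :: rest => (if p c then (pvGRun p rest).headD 0 + 1 else 0) :: pvGRun p rest

theorem pvGRun_headD (p : Char → Bool) (l : List Char) :
    (pvGRun p l).headD 0 = ((l.takeWhile p).length : Int) := by
  induction l with
  | nil => simp [pvGRun]
  | cons c rest ih =>
    by_cases h : p c
    · rw [pvGRun]
      simp only [h, if_true, List.headD_cons, List.takeWhile_cons_of_pos h, List.length_cons]
      rw [ih]; push_cast; ring
    · rw [pvGRun]
      simp [h, List.takeWhile_cons_of_neg]

theorem pvALoop_eq (l : List Char) :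
    pvALoop l = ((pvGRun (fun c => c = '?' || c = '#') l).headD 0,
                 (pvGRun (fun c => c = '#') l).headD 0,
                 pvGRun (fun c => c = '?' || c = '#') l,
                 pvGRun (fun c => c = '#') l) := by
  induction l with
  | nil => simp [pvALoop, pvGRun]
  | cons c rest ih =>
    by_cases h1 : c = '?'
    · simp [pvALoop, pvGRun, h1, ih]
    · by_cases h2 : c = '#' <;> simp [pvALoop, pvGRun, h1, h2, ih]

theorem pvGRun_block (p : Char → Bool) (l : List Char) :
    pvGRun p l =
      (List.range (l.takeWhile p).length).map
        (fun i : Nat => ((l.takeWhile p).length : Int) - (i : Int))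
      ++ pvGRun p (l.drop (l.takeWhile p).length) := by
  induction l with
  | nil => simp [pvGRun]
  | cons c rest ih =>
    by_cases h : p c
    · rw [pvGRun, pvGRun_headD, List.takeWhile_cons_of_pos h, List.length_cons,
          List.range_succ_eq_map, List.drop_succ_cons, List.map_cons, List.map_map,
          List.cons_append]
      congr 1
      · simp only [h, if_true]; push_cast; ring
      · rw [ih]
        congr 1
        apply List.map_congr_left
        intro i _
        simp only [Function.comp_apply, Nat.succ_eq_add_one]
        push_cast; ring
    · simp [pvGRun, h]

theorem pvSegFill_eq (p : Char → Bool) (l : List Char) :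
    pvSegFill p l = pvGRun p l := by
  match l with
  | [] => simp [pvSegFill, pvGRun]
  | c :: rest =>
    rw [pvSegFill]
    by_cases h : p c
    · simp only [h, if_true]
      rw [pvSegFill_eq p ((c :: rest).drop ((c :: rest).takeWhile p).length)]
      exact (pvGRun_block p (c :: rest)).symm
    · simp only [h]
      rw [pvSegFill_eq p rest, pvGRun]
      simp [h]
termination_by l.length
decreasing_by
  · simp only [List.length_drop]
    have hk : 0 < ((c :: rest).takeWhile p).length := by
      simp [h]
    simp only [List.length_cons]
    omega
  · simp

-- ===== VERDICT (by name: the statement is the Claim_ definition above) =====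
theorem get_possible_placements_spec : Claim_equal_get_possible_placements := by
  intro pattern _
  unfold Spec_get_possible_placements get_possible_placements get_possible_placements_alt
  rw [pvALoop_eq, pvSegFill_eq, pvSegFill_eq]
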